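-- pv_equiv track=rewrite | github.com/TheFirstFen/lnu | year2/ta/1DT901/assign3/Corrected/jb225rg/dirrerent.py | different
-- ===== SOURCE A (Python) =====
-- def different(lst):
--     diff = set()  # create set
--     d_list = []  # create list
--     for i in lst:
--         diff.add(i)  # add ints to set
--     for j in diff:
--         d_list.append(j)  # att ints from set to list
--     d_list.sort()  # sort the list
--     return d_list
-- ===== SOURCE B (Python) =====
-- def different(lst):
--     s = sorted(lst)
--     return s[:1] + [b for a, b in zip(s, s[1:]) if a != b]
-- ===== Notes on version B (the rewrite author's own statement) =====
-- stated objective: idiomatic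
-- what changed: B sorts first and removes duplicates in one adjacency pass (keeping each element that differs from its predecessor via zip), instead of A's hash-set dedup followed by a sort.
import Mathlib
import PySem

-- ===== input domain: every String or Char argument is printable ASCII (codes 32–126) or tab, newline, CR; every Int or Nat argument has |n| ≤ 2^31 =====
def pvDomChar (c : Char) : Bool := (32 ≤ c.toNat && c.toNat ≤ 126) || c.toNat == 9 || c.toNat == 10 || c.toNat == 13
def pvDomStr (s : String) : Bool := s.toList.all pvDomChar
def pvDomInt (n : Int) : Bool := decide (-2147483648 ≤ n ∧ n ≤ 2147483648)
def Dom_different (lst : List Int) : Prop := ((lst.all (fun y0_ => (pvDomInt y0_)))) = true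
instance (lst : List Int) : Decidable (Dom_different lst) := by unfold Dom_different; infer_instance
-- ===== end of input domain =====

-- B sorts first and removes duplicates in one adjacency pass instead of A's set-dedup-then-sort.

-- ===== PORT A =====
-- diff = set(); for i in lst: diff.add(i); d_list = [j for j in diff]; d_list.sort()
def different (lst : List Int) : List Int :=
  let diff : PySem.Set Int := lst.foldl PySem.Set.add PySem.Set.empty
  let d_list : List Int := diff.foldl (fun acc j => acc ++ [j]) []
  PySem.List.sorted d_list (fun x => x) false

-- ===== PORT B =====
-- s = sorted(lst); return s[:1] + [b for a, b in zip(s, s[1:]) if a != b]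
def different_alt (lst : List Int) : List Int :=
  let s := PySem.List.sorted lst (fun x => x) false
  s.take 1 ++ ((s.zip (s.drop 1)).filter (fun p => decide (p.1 ≠ p.2))).map Prod.snd

-- ===== PRECONDITION & SPEC =====
def Spec_different (lst : List Int) (out : List Int) : Prop := out = different_alt lst
instance (lst : List Int) (out : List Int) : Decidable (Spec_different lst out) := by unfold Spec_different; infer_instance

-- ===== CLAIM (what is proved, stated in full; the proofs are below) =====
def Claim_equal_different : Prop := ∀ (lst : List Int), Dom_different lst → Spec_different lst (different lst)

-- ===== LEMMAS AND PROOFS =====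

-- adjacent dedup, recursively (proof vehicle for B's zip/filter pass)
def dd : List Int → List Int
  | [] => []
  | [x] => [x]
  | x :: y :: t => if x = y then dd (y :: t) else x :: dd (y :: t)

lemma alt_eq_dd (s : List Int) :
    s.take 1 ++ ((s.zip (s.drop 1)).filter (fun p => decide (p.1 ≠ p.2))).map Prod.snd = dd s := by
  induction s with
  | nil => rfl
  | cons x s ih =>
    cases s with
    | nil => rfl
    | cons y t =>
      simp only [List.take, List.drop, List.zip_cons_cons, List.filter, dd] at *
      by_cases h : x = y
      · subst h
        simp only [ne_eq, not_true_eq_false, decide_false] at *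
        simpa using ih
      · simp only [ne_eq, h, not_false_eq_true, decide_true] at *
        simp only [List.map_cons, List.cons_append, List.nil_append] at *
        rw [← ih]
        rcases t with _ | ⟨z, t⟩ <;> simp

lemma mem_dd (s : List Int) (x : Int) : x ∈ dd s ↔ x ∈ s := by
  induction s with
  | nil => simp [dd]
  | cons a s ih =>
    cases s with
    | nil => simp [dd]
    | cons b t =>
      by_cases h : a = b
      · subst h; simp only [dd, if_true] at *; simp [ih]
      · simp only [dd, if_neg h] at *; simp [ih]

lemma pairwise_dd (s : List Int) (hs : s.Pairwise (· ≤ ·)) : (dd s).Pairwise (· < ·) := by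
  induction s with
  | nil => simp [dd]
  | cons a s ih =>
    cases s with
    | nil => simp [dd]
    | cons b t =>
      rcases List.pairwise_cons.mp hs with ⟨hale, hbt⟩
      by_cases h : a = b
      · simpa [dd, h] using ih hbt
      · simp only [dd, if_neg h]
        refine List.pairwise_cons.mpr ⟨?_, ih hbt⟩
        intro z hz
        have hzmem : z ∈ b :: t := (mem_dd _ _).mp hz
        have hab : a < b := lt_of_le_of_ne (hale b (by simp)) h
        rcases List.mem_cons.mp hzmem with rfl | hz'
        · exact hab
        · exact lt_of_lt_of_le hab ((List.pairwise_cons.mp hbt).1 z hz')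

lemma nodup_dd (s : List Int) (hs : s.Pairwise (· ≤ ·)) : (dd s).Nodup :=
  (pairwise_dd s hs).imp ne_of_lt

lemma foldl_append_singleton (l acc : List Int) :
    l.foldl (fun acc j => acc ++ [j]) acc = acc ++ l := by
  induction l generalizing acc with
  | nil => simp
  | cons x t ih => simp [List.foldl, ih]

-- ===== VERDICT (by name: the statement is the Claim_ definition above) =====
theorem different_spec : Claim_equal_different := by
  intro lst _
  unfold Spec_different different different_alt
  simp only []
  rw [alt_eq_dd]
  have hofl : lst.foldl PySem.Set.add PySem.Set.empty = PySem.Set.ofList lst :=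
    (PySem.Set.ofList_eq_foldl lst).symm
  rw [hofl, foldl_append_singleton, List.nil_append]
  set s := PySem.List.sorted lst (fun x => x) false with hsdef
  have hs : s.Pairwise (· ≤ ·) := by
    simpa using PySem.List.sorted_pairwise lst (fun x => x)
  apply PySem.List.sorted_eq_of_perm_of_pairwise_lt
  · -- (dd s).Perm (Set.ofList lst)
    refine (List.perm_ext_iff_of_nodup (nodup_dd s hs) (PySem.Set.nodup_ofList lst)).mpr ?_
    intro x
    rw [mem_dd, PySem.Set.mem_ofList, hsdef, PySem.List.mem_sorted]
  · simpa using pairwise_dd s hs
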